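-- pv_equiv track=rewrite | github.com/frymash/NUS-CS1010X | tutorials/tut02/tut02.py | sum_even_factorials
-- ===== SOURCE A (Python) =====
-- def sum_even_factorials(n):
--     result = 0
--     factorial_i = 1
--     for i in range(n+1):
--         if i == 0:
--             result += 1
--             continue
--         factorial_i *= i
--         if i % 2 == 0:
--             result += factorial_i
--     return result
-- ===== SOURCE B (Python) =====
-- def sum_even_factorials(n):
--     m = n if n % 2 == 0 else n - 1  # largest even number <= n
--     if m < 0:
--         return 0
--     # Horner form of the sum of factorials of the even numbers up to m
--     acc = 1
--     for i in range(m, 1, -2):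
--         acc = 1 + (i - 1) * i * acc
--     return acc
-- ===== Notes on version B (the rewrite author's own statement) =====
-- stated objective: alternative
-- what changed: B evaluates the sum in Horner form back-to-front over the even indices (acc = one + (i-1)*i*acc for i = m, m-2, ...), never materializing any factorial or running sum, instead of A's forward pass over all indices with an incremental factorial, a parity test and a special first-iteration branch.
import Mathlib
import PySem

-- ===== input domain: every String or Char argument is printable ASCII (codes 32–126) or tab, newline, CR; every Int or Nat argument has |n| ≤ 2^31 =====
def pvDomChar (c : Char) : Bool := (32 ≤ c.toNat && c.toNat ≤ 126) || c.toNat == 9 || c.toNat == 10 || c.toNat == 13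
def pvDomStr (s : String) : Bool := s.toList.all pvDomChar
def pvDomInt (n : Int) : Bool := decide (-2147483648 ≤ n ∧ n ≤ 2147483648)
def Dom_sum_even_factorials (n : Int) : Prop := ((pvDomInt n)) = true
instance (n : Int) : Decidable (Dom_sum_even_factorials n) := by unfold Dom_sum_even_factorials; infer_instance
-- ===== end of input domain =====

-- B evaluates the sum in Horner form back-to-front over the even indices, with no
-- materialized factorial and no running sum (objective: alternative).

-- ===== PORT A =====
-- loop body of A's for-loop over range(n+1); state = (result, factorial_i)
def pvStepA (st : Int × Int) (i : Int) : Int × Int :=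
  if i == 0 then (st.1 + 1, st.2)
  else
    let f := st.2 * i
    if PySem.Int.mod i 2 == 0 then (st.1 + f, f) else (st.1, f)

def sum_even_factorials (n : Int) : Int :=
  ((PySem.List.pyRange 0 (n + 1) 1).foldl pvStepA (0, 1)).1

-- ===== PORT B =====
def sum_even_factorials_alt (n : Int) : Int :=
  let m := if PySem.Int.mod n 2 == 0 then n else n - 1
  if m < 0 then 0
  else (PySem.List.pyRange m 1 (-2)).foldl (fun acc i => 1 + (i - 1) * i * acc) 1

-- ===== PRECONDITION & SPEC =====
def Spec_sum_even_factorials (n : Int) (out : Int) : Prop := out = sum_even_factorials_alt n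
instance (n : Int) (out : Int) : Decidable (Spec_sum_even_factorials n out) := by unfold Spec_sum_even_factorials; infer_instance

-- ===== CLAIM (what is proved, stated in full; the proofs are below) =====
def Claim_equal_sum_even_factorials : Prop := ∀ (n : Int), Dom_sum_even_factorials n → Spec_sum_even_factorials n (sum_even_factorials n)

-- ===== LEMMAS AND PROOFS =====

-- mathematical factorial on Nat, the common reference point of both ports
def pvSfact : Nat → Int
  | 0 => 1
  | (k+1) => ((k : Int) + 1) * pvSfact k

theorem pvSfact_succ (k : Nat) : pvSfact (k + 1) = ((k : Int) + 1) * pvSfact k := rfl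

-- A's loop over range(n+1): state after the whole pass, for n = m ≥ 0
theorem pvA_invariant (m : Nat) :
    (PySem.List.pyRange 0 ((m : Int) + 1) 1).foldl pvStepA (0, 1)
      = (((List.range (m / 2 + 1)).map (fun k => pvSfact (2 * k))).sum, pvSfact m) := by
  induction m with
  | zero => decide
  | succ m ih =>
    have h0 : (0 : Int) ≤ (m : Int) + 1 := by positivity
    have hcast : ((m + 1 : Nat) : Int) + 1 = ((m : Int) + 1) + 1 := by push_cast; ring
    rw [hcast, PySem.List.pyRange_one_succ_right h0, List.foldl_append, ih]
    show pvStepA _ ((m : Int) + 1) = _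
    unfold pvStepA
    have hne : (((m : Int) + 1) == 0) = false := by
      simp only [beq_eq_false_iff_ne]; omega
    rw [hne]
    simp only [Bool.false_eq_true, if_false]
    have hmod : PySem.Int.mod ((m : Int) + 1) 2 = (((m + 1) % 2 : Nat) : Int) := by
      rw [show ((m : Int) + 1) = ((m + 1 : Nat) : Int) by push_cast; ring]
      exact PySem.Int.mod_natCast (m + 1) 2
    have hf : pvSfact m * ((m : Int) + 1) = pvSfact (m + 1) := by
      rw [pvSfact_succ]; ring
    rcases Nat.even_or_odd m with ⟨j, rfl⟩ | ⟨j, rfl⟩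
    · -- m = j + j even, m+1 odd: branch not taken, even-sum index set unchanged
      have hcond : (PySem.Int.mod ((j + j : Nat) + 1) 2 == 0) = false := by
        rw [hmod, show (j + j + 1) % 2 = 1 by omega]; decide
      rw [hcond]
      simp only [Bool.false_eq_true, if_false]
      rw [show (j + j + 1) / 2 + 1 = (j + j) / 2 + 1 by omega, hf]
    · -- m = 2j+1 odd, m+1 even: add pvSfact (m+1); index set gains j+1, 2*(j+1)=m+1
      have hcond : (PySem.Int.mod ((2 * j + 1 : Nat) + 1) 2 == 0) = true := by
        rw [hmod, show (2 * j + 1 + 1) % 2 = 0 by omega]; decide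
      rw [hcond]
      simp only [if_true]
      rw [show (2 * j + 1 + 1) / 2 + 1 = (j + 1) + 1 by omega,
          show (2 * j + 1) / 2 + 1 = j + 1 by omega, hf]
      simp [List.range_succ, show 2 * (j + 1) = 2 * j + 1 + 1 by omega]
      ring

-- the countdown range(2j+2, 1, -2) is 2j+2 consed onto range(2j, 1, -2)
theorem pvL_cons (j : Nat) :
    PySem.List.pyRange (2 * ((j : Int) + 1)) 1 (-2)
      = (2 * (j : Int) + 2) :: PySem.List.pyRange (2 * (j : Int)) 1 (-2) := by
  rcases Nat.eq_zero_or_pos j with h | h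
  · subst h; decide
  · have hj : (1 : Int) < 2 * (j : Int) := by
      have : (1 : Nat) ≤ j := h
      omega
    rw [PySem.List.pyRange_of_neg _ _ (by norm_num : (-2 : Int) < 0),
        PySem.List.pyRange_of_neg _ _ (by norm_num : (-2 : Int) < 0)]
    rw [if_pos (by omega : (1 : Int) < 2 * ((j : Int) + 1)), if_pos hj]
    simp only [neg_neg]
    rw [show ((2 * ((j : Int) + 1) - 1 + 2 - 1) / 2).toNat = j + 1 by omega,
        show ((2 * (j : Int) - 1 + 2 - 1) / 2).toNat = j by omega]
    rw [List.range_succ_eq_map, List.map_cons, List.map_map]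
    refine congrArg₂ _ (by push_cast; ring) (List.map_congr_left fun k _ => ?_)
    show 2 * ((j : Int) + 1) + -2 * ((k : Nat) + 1 : Nat) = 2 * (j : Int) + -2 * (k : Nat)
    push_cast; ring

-- B's Horner loop: value of the fold over range(2j, 1, -2) as a function of acc
theorem pvHorner (j : Nat) : ∀ acc : Int,
    (PySem.List.pyRange ((2 * j : Nat) : Int) 1 (-2)).foldl
        (fun acc i => 1 + (i - 1) * i * acc) acc
      = ((List.range j).map (fun k => pvSfact (2 * k))).sum + pvSfact (2 * j) * acc := by
  induction j with
  | zero => intro acc; simp [PySem.List.pyRange_of_neg, pvSfact]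
  | succ j ih =>
    intro acc
    rw [show ((2 * (j + 1) : Nat) : Int) = 2 * ((j : Int) + 1) by push_cast; ring,
        pvL_cons j, List.foldl_cons,
        show (2 * (j : Int)) = ((2 * j : Nat) : Int) by push_cast; ring, ih]
    rw [List.range_succ, List.map_append, List.sum_append,
        show 2 * (j + 1) = (2 * j + 1) + 1 by omega,
        pvSfact_succ (2 * j + 1), pvSfact_succ (2 * j)]
    simp only [List.map_cons, List.map_nil, List.sum_cons, List.sum_nil, add_zero]
    push_cast
    ring

-- ===== VERDICT (by name: the statement is the Claim_ definition above) =====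
theorem sum_even_factorials_spec : Claim_equal_sum_even_factorials := by
  intro n _
  unfold Spec_sum_even_factorials
  by_cases h : 0 ≤ n
  · obtain ⟨mm, rfl⟩ := Int.eq_ofNat_of_zero_le h
    have hA : sum_even_factorials (mm : Int)
        = ((List.range (mm / 2 + 1)).map (fun k => pvSfact (2 * k))).sum := by
      unfold sum_even_factorials
      rw [pvA_invariant mm]
    have hm : (if (PySem.Int.mod ((mm : Nat) : Int) 2 == 0) then ((mm : Nat) : Int)
                else ((mm : Nat) : Int) - 1) = ((2 * (mm / 2) : Nat) : Int) := by
      have h2 : PySem.Int.mod ((mm : Nat) : Int) 2 = ((mm % 2 : Nat) : Int) :=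
        PySem.Int.mod_natCast mm 2
      rcases Nat.even_or_odd mm with ⟨t, rfl⟩ | ⟨t, rfl⟩
      · rw [h2, show (t + t) % 2 = 0 by omega]
        simp only [Nat.cast_zero, beq_self_eq_true, if_true]
        push_cast; omega
      · rw [h2, show (2 * t + 1) % 2 = 1 by omega]
        simp only [Nat.cast_one]
        have : ((1 : Int) == 0) = false := by decide
        rw [this]
        simp only [Bool.false_eq_true, if_false]
        push_cast; omega
    have hB : sum_even_factorials_alt (mm : Int)
        = ((List.range (mm / 2 + 1)).map (fun k => pvSfact (2 * k))).sum := by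
      simp only [sum_even_factorials_alt]
      rw [hm, if_neg (by omega : ¬ ((2 * (mm / 2) : Nat) : Int) < 0),
          pvHorner (mm / 2) 1, List.range_succ, List.map_append, List.sum_append]
      simp
    rw [hA, hB]
  · have h1 : n + 1 ≤ 0 := by omega
    have hA : sum_even_factorials n = 0 := by
      unfold sum_even_factorials
      rw [PySem.List.pyRange_one_eq_nil h1]
      rfl
    have hB : sum_even_factorials_alt n = 0 := by
      simp only [sum_even_factorials_alt]
      split_ifs <;> first | rfl | omega
    rw [hA, hB]
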